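-- pv_equiv track=rewrite | github.com/pypi-data/pypi-mirror-231 | packages/pdfTableJson/pdfTableJson-0.0.5.tar.gz/pdfTableJson-0.0.5/pdfTableJson/converter.py | f_process_list
-- ===== SOURCE A (Python) =====
-- def f_process_list(input_list):
--     result_list = []
--     current_group = []
--     prev_length = None
--
--     for item in input_list:
--         current_length = len(item)
--
--         if prev_length is None:
--             prev_length = current_length
--             current_group = [item]
--         elif prev_length == current_length:
--             current_group.append(item)
--         else:
--             result_list.append(current_group)
--             current_group = [item]
--             prev_length = current_length
--
--     if current_group:
--         result_list.append(current_group)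
--
--     return result_list
-- ===== SOURCE B (Python) =====
-- def f_process_list(input_list):
--     # Two-pointer span grouping: find each maximal run of equal-length items and slice it out.
--     result = []
--     i = 0
--     n = len(input_list)
--     while i < n:
--         j = i + 1
--         k = len(input_list[i])
--         while j < n and len(input_list[j]) == k:
--             j += 1
--         result.append(input_list[i:j])
--         i = j
--     return result
-- ===== Notes on version B (the rewrite author's own statement) =====
-- stated objective: alternative
-- what changed: Replaces A's prev_length/current_group state machine with a two-pointer span scan that slices out each maximal run of equal-length items directly.
import Mathlib
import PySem

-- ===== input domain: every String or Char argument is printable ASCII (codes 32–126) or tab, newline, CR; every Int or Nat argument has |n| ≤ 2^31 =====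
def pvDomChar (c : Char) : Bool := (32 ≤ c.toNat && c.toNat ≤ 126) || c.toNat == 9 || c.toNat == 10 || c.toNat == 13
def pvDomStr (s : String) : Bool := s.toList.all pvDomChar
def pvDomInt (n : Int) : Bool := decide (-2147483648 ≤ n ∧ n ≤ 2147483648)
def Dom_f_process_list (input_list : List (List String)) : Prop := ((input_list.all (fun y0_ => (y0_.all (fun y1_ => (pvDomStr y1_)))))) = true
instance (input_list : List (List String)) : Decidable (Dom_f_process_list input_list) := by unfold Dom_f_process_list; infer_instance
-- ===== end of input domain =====

-- B replaces A's prev_length/current_group state machine with a two-pointer span scan; objective: alternative (same cost).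


-- ===== PORT A =====
-- one loop step of A: state (result_list, current_group, prev_length)
def f_process_list_step
    (st : List (List (List String)) × List (List String) × Option Nat)
    (item : List String) : List (List (List String)) × List (List String) × Option Nat :=
  match st with
  | (res, cur, prev) =>
    match prev with
    | none => (res, [item], some item.length)
    | some p =>
      if p = item.length then (res, cur ++ [item], some p)
      else (res ++ [cur], [item], some item.length)

def f_process_list (input_list : List (List String)) : List (List (List String)) :=
  match input_list.foldl f_process_list_step ([], [], none) with
  | (res, cur, _) => if cur ≠ [] then res ++ [cur] else res

-- ===== PORT B =====
-- span scan: peel off the maximal run of items with the first item's length, recurse on the rest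
def f_process_list_alt (input_list : List (List String)) : List (List (List String)) :=
  match input_list with
  | [] => []
  | x :: xs =>
    (x :: xs.takeWhile (fun y => y.length == x.length))
      :: f_process_list_alt (xs.dropWhile (fun y => y.length == x.length))
termination_by input_list.length
decreasing_by
  simp only [List.length_cons]
  exact Nat.lt_succ_of_le (List.length_dropWhile_le _ _)

-- ===== PRECONDITION & SPEC =====
def Spec_f_process_list (input_list : List (List String)) (out : List (List (List String))) : Prop := out = f_process_list_alt input_list
instance (input_list : List (List String)) (out : List (List (List String))) : Decidable (Spec_f_process_list input_list out) := by unfold Spec_f_process_list; infer_instance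

-- ===== CLAIM (what is proved, stated in full; the proofs are below) =====
def Claim_equal_f_process_list : Prop := ∀ (input_list : List (List String)), Dom_f_process_list input_list → Spec_f_process_list input_list (f_process_list input_list)

-- ===== LEMMAS AND PROOFS =====

def pvFinish (st : List (List (List String)) × List (List String) × Option Nat) :
    List (List (List String)) :=
  match st with
  | (res, cur, _) => if cur ≠ [] then res ++ [cur] else res

lemma pv_loop_invariant (xs : List (List String)) :
    ∀ (res : List (List (List String))) (cur : List (List String)) (p : Nat), cur ≠ [] →
      pvFinish (xs.foldl f_process_list_step (res, cur, some p))
        = res ++ ((cur ++ xs.takeWhile (fun y => y.length == p))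
            :: f_process_list_alt (xs.dropWhile (fun y => y.length == p))) := by
  induction xs with
  | nil =>
    intro res cur p hcur
    simp [pvFinish, f_process_list_alt, hcur]
  | cons y ys ih =>
    intro res cur p hcur
    by_cases h : p = y.length
    · have hb : (fun y : List String => y.length == p) y = true := by simp [h]
      simp only [List.foldl_cons, f_process_list_step, if_pos h,
        List.takeWhile_cons, List.dropWhile_cons, hb]
      rw [ih (res) (cur ++ [y]) p (by simp)]
      simp
    · have hb : (fun y : List String => y.length == p) y = false := by
        simp [Ne.symm h]
      simp only [List.foldl_cons, f_process_list_step, if_neg h,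
        List.takeWhile_cons, List.dropWhile_cons, hb]
      rw [ih (res ++ [cur]) [y] y.length (by simp)]
      simp [f_process_list_alt]

-- ===== VERDICT (by name: the statement is the Claim_ definition above) =====
theorem f_process_list_spec : Claim_equal_f_process_list := by
  intro input_list _
  unfold Spec_f_process_list
  cases input_list with
  | nil => simp [f_process_list, f_process_list_alt]
  | cons x xs =>
    have h := pv_loop_invariant xs [] [x] x.length (by simp)
    have e : f_process_list (x :: xs)
        = pvFinish (xs.foldl f_process_list_step ([], [x], some x.length)) := by
      simp only [f_process_list, pvFinish, List.foldl_cons, f_process_list_step]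
    rw [e, h]
    simp [f_process_list_alt]
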